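-- pv_equiv track=rewrite | github.com/SaneethSunkari/Ai-Business-Analyst | de-10-ai-data-middleware/backend/vendor/tokenfirewall/tokenfirewall/main.py | _keyword_set
-- ===== SOURCE A (Python) =====
-- def _keyword_set(text: str) -> set[str]:
--     return {
--         token
--         for token in (
--             "".join(ch.lower() if ch.isalnum() else " " for ch in text).split()
--         )
--         if len(token) >= 4
--     }
-- ===== SOURCE B (Python) =====
-- def _keyword_set(text: str) -> set[str]:
--     # single-pass character state machine instead of map/join/split/filter
--     result = set()
--     cur = []
--     for ch in text:
--         if ch.isalnum():
--             cur.append(ch.lower())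
--         else:
--             if len(cur) >= 4:
--                 result.add("".join(cur))
--             cur = []
--     if len(cur) >= 4:
--         result.add("".join(cur))
--     return result
-- ===== Notes on version B (the rewrite author's own statement) =====
-- stated objective: alternative
-- what changed: Replaced A's map-every-char/join/split/filter/set pipeline by a single-pass character state machine that accumulates the current token and flushes it into the set at each separator and at the end.
import Mathlib
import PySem

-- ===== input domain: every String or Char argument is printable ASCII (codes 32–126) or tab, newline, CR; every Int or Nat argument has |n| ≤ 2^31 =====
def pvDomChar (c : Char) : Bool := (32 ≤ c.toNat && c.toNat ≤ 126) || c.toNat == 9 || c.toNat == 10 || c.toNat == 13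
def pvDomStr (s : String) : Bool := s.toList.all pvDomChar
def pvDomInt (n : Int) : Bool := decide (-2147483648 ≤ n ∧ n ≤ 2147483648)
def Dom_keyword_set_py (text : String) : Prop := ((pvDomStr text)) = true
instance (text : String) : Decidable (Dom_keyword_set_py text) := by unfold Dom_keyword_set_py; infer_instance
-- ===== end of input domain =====

-- B replaces A's map/join/split/filter pipeline by a single-pass character state machine; alternative decomposition, same O(n) cost.


-- ===== PORT A =====
-- the generator expression's per-char value: ch.lower() if ch.isalnum() else " "
def pvClean (ch : Char) : Char :=
  if PySem.Chars.isalnum ch then PySem.Chars.lowerChar ch else ' '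

def keyword_set_py (text : String) : List String :=
  PySem.Set.ofList
    (((PySem.Chars.split₀ (text.toList.map pvClean)).map String.ofList).filter
      (fun token => decide ((4 : Int) ≤ PySem.Str.len token)))

-- ===== PORT B =====
-- loop body: extend the current token on an alphanumeric char, else flush it (if long enough) and reset
def pvStep (st : PySem.Set String × List Char) (ch : Char) : PySem.Set String × List Char :=
  if PySem.Chars.isalnum ch then
    (st.1, st.2 ++ [PySem.Chars.lowerChar ch])
  else if (4 : Int) ≤ PySem.List.len st.2 then
    (PySem.Set.add st.1 (String.ofList st.2), [])
  else
    (st.1, [])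

-- the code after the loop: flush the trailing token
def pvFinish (st : PySem.Set String × List Char) : List String :=
  if (4 : Int) ≤ PySem.List.len st.2 then PySem.Set.add st.1 (String.ofList st.2) else st.1

def keyword_set_py_alt (text : String) : List String :=
  pvFinish (text.toList.foldl pvStep (PySem.Set.empty, []))

-- ===== PRECONDITION & SPEC =====
def Spec_keyword_set_py (text : String) (out : List String) : Prop := out = keyword_set_py_alt text
instance (text : String) (out : List String) : Decidable (Spec_keyword_set_py text out) := by unfold Spec_keyword_set_py; infer_instance

-- ===== CLAIM (what is proved, stated in full; the proofs are below) =====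
def Claim_equal_keyword_set_py : Prop := ∀ (text : String), Dom_keyword_set_py text → Spec_keyword_set_py text (keyword_set_py text)

-- ===== LEMMAS AND PROOFS =====

-- an alphanumeric char stays non-whitespace after lowering
theorem pv_lower_alnum_not_space (c : Char) (h : PySem.Chars.isalnum c = true) :
    PySem.Chars.isspace (PySem.Chars.lowerChar c) = false := by
  simp only [PySem.Chars.isalnum, PySem.Chars.isalpha, PySem.Chars.isdigit, PySem.Chars.isupper,
    PySem.Chars.islower, Bool.or_eq_true, Bool.and_eq_true, decide_eq_true_eq,
    Char.le_def, UInt32.le_iff_toNat_le, Char.toNat_val] at h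
  simp only [show ('A').toNat = 65 from rfl, show ('Z').toNat = 90 from rfl,
    show ('a').toNat = 97 from rfl, show ('z').toNat = 122 from rfl,
    show ('0').toNat = 48 from rfl, show ('9').toNat = 57 from rfl] at h
  by_cases hu : PySem.Chars.isupper c = true
  · have hu' : 65 ≤ c.toNat ∧ c.toNat ≤ 90 := by
      simpa only [PySem.Chars.isupper, Bool.and_eq_true, decide_eq_true_eq, Char.le_def,
        UInt32.le_iff_toNat_le, Char.toNat_val, show ('A').toNat = 65 from rfl,
        show ('Z').toNat = 90 from rfl] using hu
    have hlt : c.toNat + 32 < 55296 := by omega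
    have htn : (Char.ofNat (c.toNat + 32)).toNat = c.toNat + 32 := by
      rw [Char.ofNat, dif_pos (Or.inl hlt)]
      rfl
    simp only [PySem.Chars.lowerChar, hu, if_true, PySem.Chars.isspace, htn]
    simp only [Bool.or_eq_false_iff, Bool.and_eq_false_iff, decide_eq_false_iff_not]
    omega
  · have hu' : ¬ (65 ≤ c.toNat ∧ c.toNat ≤ 90) := by
      intro hc
      exact hu (by
        simp only [PySem.Chars.isupper, Bool.and_eq_true, decide_eq_true_eq, Char.le_def,
          UInt32.le_iff_toNat_le, Char.toNat_val, show ('A').toNat = 65 from rfl,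
          show ('Z').toNat = 90 from rfl]
        omega)
    simp only [PySem.Chars.lowerChar, hu, if_false, Bool.false_eq_true, PySem.Chars.isspace]
    simp only [Bool.or_eq_false_iff, Bool.and_eq_false_iff, decide_eq_false_iff_not]
    omega

-- split₀.go's accumulator is a prefix of its result
theorem pv_go_acc (cs : List Char) : ∀ (cur : List Char) (acc : List (List Char)),
    PySem.Chars.split₀.go cs cur acc = acc.reverse ++ PySem.Chars.split₀.go cs cur [] := by
  induction cs with
  | nil =>
    intro cur acc
    by_cases h : cur.isEmpty = true <;> simp [PySem.Chars.split₀.go, h]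
  | cons c cs ih =>
    intro cur acc
    by_cases hs : PySem.Chars.isspace c = true
    · by_cases he : cur.isEmpty = true
      · simp only [PySem.Chars.split₀.go, hs, he, if_true]
        exact ih [] acc
      · simp only [PySem.Chars.split₀.go, hs, he, if_true, if_false, Bool.false_eq_true]
        rw [ih [] (cur.reverse :: acc), ih [] [cur.reverse]]
        simp
    · simp only [PySem.Chars.split₀.go, hs, Bool.false_eq_true, if_false]
      exact ih (c :: cur) acc

-- main invariant: running B's loop from state (s, cur) and flushing equals
-- updating s with the long tokens A's tokenizer finds in cur ++ cs
theorem pv_main (cs : List Char) : ∀ (s : PySem.Set String) (cur : List Char),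
    pvFinish (cs.foldl pvStep (s, cur))
      = PySem.Set.update s
          (((PySem.Chars.split₀.go (cs.map pvClean) cur.reverse []).map String.ofList).filter
            (fun token => decide ((4 : Int) ≤ PySem.Str.len token))) := by
  induction cs with
  | nil =>
    intro s cur
    by_cases he : cur = []
    · subst he
      simp [PySem.Chars.split₀.go, pvFinish, PySem.Set.update, PySem.List.len_eq]
    · have he' : cur.reverse.isEmpty = false := by simp [he]
      simp only [List.foldl_nil, List.map_nil]
      rw [show PySem.Chars.split₀.go [] cur.reverse [] = [cur] by
        simp [PySem.Chars.split₀.go, he']]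
      by_cases hl : (4 : Int) ≤ PySem.List.len cur
      · have hln : (4 : Nat) ≤ cur.length := by rw [PySem.List.len_eq] at hl; exact_mod_cast hl
        rw [pvFinish, if_pos hl]
        simp [PySem.Set.update, String.length_ofList, hln]
      · have hln : ¬ (4 : Nat) ≤ cur.length := by
          rw [PySem.List.len_eq] at hl; intro h; exact hl (by exact_mod_cast h)
        rw [pvFinish, if_neg hl]
        simp [PySem.Set.update, String.length_ofList, hln]
  | cons c cs ih =>
    intro s cur
    by_cases ha : PySem.Chars.isalnum c = true
    · have hns := pv_lower_alnum_not_space c ha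
      simp only [List.foldl_cons, pvStep, ha, if_true, List.map_cons, pvClean]
      rw [show (PySem.Chars.split₀.go (PySem.Chars.lowerChar c :: cs.map pvClean) cur.reverse [])
            = PySem.Chars.split₀.go (cs.map pvClean) (PySem.Chars.lowerChar c :: cur.reverse) [] by
          simp [PySem.Chars.split₀.go, hns]]
      rw [show PySem.Chars.lowerChar c :: cur.reverse = (cur ++ [PySem.Chars.lowerChar c]).reverse by simp]
      exact ih s (cur ++ [PySem.Chars.lowerChar c])
    · have hcl : pvClean c = ' ' := by simp [pvClean, ha]
      have hsp : PySem.Chars.isspace ' ' = true := by decide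
      simp only [List.foldl_cons, pvStep, ha, Bool.false_eq_true, if_false, List.map_cons, hcl]
      by_cases he : cur = []
      · subst he
        have : PySem.Chars.split₀.go (' ' :: cs.map pvClean) [].reverse []
            = PySem.Chars.split₀.go (cs.map pvClean) [] [] := by
          simp [PySem.Chars.split₀.go, hsp]
        rw [this]
        simpa [PySem.List.len_eq] using ih s []
      · have he' : cur.reverse.isEmpty = false := by simp [he]
        have hgo : PySem.Chars.split₀.go (' ' :: cs.map pvClean) cur.reverse []
            = [cur] ++ PySem.Chars.split₀.go (cs.map pvClean) [] [] := by
          simp only [PySem.Chars.split₀.go, hsp, he', Bool.false_eq_true, if_false, if_true]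
          rw [pv_go_acc]
          simp
        rw [hgo]
        by_cases hl : (4 : Int) ≤ PySem.List.len cur
        · have hln : (4 : Nat) ≤ cur.length := by rw [PySem.List.len_eq] at hl; exact_mod_cast hl
          rw [if_pos hl, ih (PySem.Set.add s (String.ofList cur)) []]
          simp [PySem.Set.update, String.length_ofList, hln]
        · have hln : ¬ (4 : Nat) ≤ cur.length := by
            rw [PySem.List.len_eq] at hl; intro h; exact hl (by exact_mod_cast h)
          rw [if_neg hl, ih s []]
          simp [PySem.Set.update, String.length_ofList, hln]

-- ===== VERDICT (by name: the statement is the Claim_ definition above) =====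
theorem keyword_set_py_spec : Claim_equal_keyword_set_py := by
  intro text _
  show keyword_set_py text = keyword_set_py_alt text
  rw [keyword_set_py_alt, pv_main]
  rw [keyword_set_py, PySem.Chars.split₀]
  rw [show PySem.Set.empty = ([] : PySem.Set String) from rfl, PySem.Set.update_nil_left]
  simp
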